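-- pv_equiv track=rewrite | github.com/T-Marenk/tiralabra | src/peli/peli.py | katso_vasen_oikea
-- ===== SOURCE A (Python) =====
-- def katso_vasen_oikea(suunta: str, taulukko: list):
--     """Funktio, joka katsoo, voiko ruudukkoa liikuttaa vasemmalle tai oikealle
--
--     Args:
--         suunta: Suunta, johon ruudukon liikkuvuus tarkistetaan
--         taulukko: Peli ruudukko
--
--     Returns:
--         Totuusarvon siitä, voiko ruudukkoa liikuttaa tarkistettavaan suuntaan
--     """
--
--     totuudet = {1: False, 2:False, 3:False, 4:False}
--     if suunta == "vasen":
--         a = 0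
--         b = 4
--         c = 1
--     elif suunta == "oikea":
--         a = 3
--         b = -1
--         c = -1
--     k = 1
--     for i in taulukko:
--         edellinen = None
--         for j in range(a,b,c):
--             if i[j] == 0:
--                 totuudet[k] = True
--             elif edellinen == None:
--                 edellinen = i[j]
--                 if totuudet[k]:
--                     return True
--                 continue
--             else:
--                 if i[j] == edellinen:
--                     return True
--                 elif totuudet[k]:
--                     return True
--                 edellinen = i[j]
--         k += 1
--     return False
-- ===== SOURCE B (Python) =====
-- def _siirra(r):
--     """Move row r toward index 0: compact non-zero tiles and merge equal adjacent pairs once."""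
--     tiles = [x for x in r if x != 0]
--     out = []
--     i = 0
--     while i < len(tiles):
--         if i + 1 < len(tiles) and tiles[i] == tiles[i + 1]:
--             out.append(tiles[i] * 2)
--             i += 2
--         else:
--             out.append(tiles[i])
--             i += 1
--     return out + [0] * (len(r) - len(out))
--
--
-- def katso_vasen_oikea(suunta: str, taulukko: list):
--     for rivi in taulukko:
--         if suunta == "vasen":
--             r = rivi[:4]
--         elif suunta == "oikea":
--             r = rivi[:4][::-1]
--         else:
--             raise ValueError("tuntematon suunta: " + repr(suunta))
--         if _siirra(r) != r:
--             return True
--     return False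
-- ===== Notes on version B (the rewrite author's own statement) =====
-- stated objective: simpler
-- what changed: Instead of A's per-row flag/previous-tile state machine with early returns, B actually performs the move on each row (extract non-zero tiles, merge equal adjacent pairs once, pad with zeros; reversed for 'oikea') and returns True iff some row changes.
import Mathlib
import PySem

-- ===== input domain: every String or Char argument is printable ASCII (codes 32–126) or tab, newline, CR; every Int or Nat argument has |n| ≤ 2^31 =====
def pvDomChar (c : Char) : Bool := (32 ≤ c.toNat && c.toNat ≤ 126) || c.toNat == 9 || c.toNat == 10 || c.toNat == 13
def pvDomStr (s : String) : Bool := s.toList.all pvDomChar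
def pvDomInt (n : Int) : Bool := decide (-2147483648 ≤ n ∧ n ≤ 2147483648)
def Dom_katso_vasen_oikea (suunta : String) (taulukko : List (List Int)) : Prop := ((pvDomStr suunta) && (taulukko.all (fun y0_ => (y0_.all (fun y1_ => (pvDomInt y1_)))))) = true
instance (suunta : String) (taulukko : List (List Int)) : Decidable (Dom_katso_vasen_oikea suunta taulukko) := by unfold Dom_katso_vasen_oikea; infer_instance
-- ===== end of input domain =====

-- B replaces A's per-row flag/previous-tile state machine by actually performing the move on each
-- row and comparing with the original (objective: simpler). Neither version mutates taulukko.


-- ===== PORT A =====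
-- inner 'for j in range(a,b,c)' loop: `none` result = the Python's early `return True`,
-- `some tot'` = the loop finished with dict totuudet = tot'. i[j] is pyGet? (default
-- irrelevant: Pre_ keeps every accessed index in range), totuudet[k] is Dict.get?
-- (default irrelevant: Pre_ keeps k among the initialised keys 1..4).
def rowLoopA (row : List Int) (k : Int) :
    List Int → Option Int → PySem.Dict Int Bool → Option (PySem.Dict Int Bool)
  | [], _, tot => some tot
  | j :: js, edellinen, tot =>
    let v := (PySem.List.pyGet? row j).getD 0
    if v = 0 then rowLoopA row k js edellinen (tot.insert k true)
    else
      match edellinen with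
      | none => if (tot.get? k).getD false then none else rowLoopA row k js (some v) tot
      | some e =>
        if v = e then none
        else if (tot.get? k).getD false then none
        else rowLoopA row k js (some v) tot

-- outer 'for i in taulukko' loop with the running dict tot and counter k
def outLoopA (a b c : Int) : List (List Int) → PySem.Dict Int Bool → Int → Bool
  | [], _, _ => false
  | i :: rest, tot, k =>
    match rowLoopA i k (PySem.List.pyRange a b c) none tot with
    | none => true
    | some tot' => outLoopA a b c rest tot' (k + 1)

def katso_vasen_oikea (suunta : String) (taulukko : List (List Int)) : Bool :=
  let totuudet : PySem.Dict Int Bool :=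
    ((((PySem.Dict.empty).insert 1 false).insert 2 false).insert 3 false).insert 4 false
  -- invalid suunta leaves a,b,c unbound in Python (UnboundLocalError on a non-empty grid,
  -- excluded by Pre_); the dummy (0,0,1) is never reached inside Pre_
  let abc : Int × Int × Int :=
    if suunta = "vasen" then (0, 4, 1)
    else if suunta = "oikea" then (3, -1, -1)
    else (0, 0, 1)
  outLoopA abc.1 abc.2.1 abc.2.2 taulukko totuudet 1

-- ===== PORT B =====
-- merge step of Source B's while loop over the extracted tiles
def merge2 : List Int → List Int
  | [] => []
  | [x] => [x]
  | x :: y :: rest => if x = y then x * 2 :: merge2 rest else x :: merge2 (y :: rest)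

-- Source B's _siirra: non-zero tiles, merged, padded with zeros to the row length
def siirra (r : List Int) : List Int :=
  let out := merge2 (r.filter (fun x => x ≠ 0))
  out ++ List.replicate (r.length - out.length) 0

def katso_vasen_oikea_alt (suunta : String) (taulukko : List (List Int)) : Bool :=
  taulukko.any (fun rivi =>
    let r := if suunta = "vasen" then PySem.List.slice rivi none (some 4)        -- rivi[:4]
             else if suunta = "oikea" then (PySem.List.slice rivi none (some 4)).reverse
             else []   -- Python B raises ValueError here; outside Pre_, value irrelevant
    siirra r ≠ r)

-- ===== PRECONDITION & SPEC =====
-- helper predicates for Pre_ (closed-form, on the input only):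
-- trigP s: the tile list s allows a move — a 0 before a non-zero tile, or two equal non-zero
-- tiles with only 0s between them
def trigP (s : List Int) : Prop :=
  ∃ j < s.length, ∃ i < j,
    ((s.getD i 0 = 0 ∧ s.getD j 0 ≠ 0) ∨
     (s.getD i 0 ≠ 0 ∧ s.getD j 0 = s.getD i 0 ∧ ∀ k < j, i < k → s.getD k 0 = 0))

-- the 4-tile prefix of a row in the scanned direction
def viewP (suunta : String) (r : List Int) : List Int :=
  if suunta = "vasen" then r.take 4 else (r.take 4).reverse

-- row r at row index m is scanned to the end without a move being found
def passP (suunta : String) (m : Nat) (r : List Int) : Prop :=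
  4 ≤ r.length ∧ ¬ trigP (viewP suunta r) ∧ (4 ≤ m → ∀ x ∈ viewP suunta r, x = 0)

-- row r at row index m yields a move before any out-of-range/missing-key access
def trigRowP (suunta : String) (m : Nat) (r : List Int) : Prop :=
  trigP (viewP suunta r) ∧ (suunta = "oikea" → 4 ≤ r.length) ∧
    (4 ≤ m → (viewP suunta r).getD 0 0 = 0)

-- Pre_ describes exactly the inputs on which A RETURNS (checked row by row): the empty grid
-- (False for any suunta), else a valid direction and, for every row that is reached (all rows
-- before it scanned clean, passP), that row either scans clean or yields a move before A's
-- scan can go wrong (trigRowP). Outside Pre_ A raises: invalid suunta with a non-empty grid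
-- (UnboundLocalError), a reached row shorter than 4 whose scan runs off the end (IndexError),
-- a reached fifth-or-later row whose first scanned tile is non-zero (KeyError: totuudet has
-- keys 1..4 only).
-- boolean forms of the row predicates (decide with an explicitly built instance)
def passB (suunta : String) (m : Nat) (r : List Int) : Bool :=
  @decide (passP suunta m r) (by unfold passP trigP viewP; infer_instance)
def trigRowB (suunta : String) (m : Nat) (r : List Int) : Bool :=
  @decide (trigRowP suunta m r) (by unfold trigRowP trigP viewP; infer_instance)

def Pre_katso_vasen_oikea (suunta : String) (taulukko : List (List Int)) : Prop :=
  taulukko = [] ∨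
    ((suunta = "vasen" ∨ suunta = "oikea") ∧
      ∀ m < taulukko.length,
        (∀ m' < m, passB suunta m' (taulukko.getD m' []) = true) →
        (passB suunta m (taulukko.getD m []) = true ∨
         trigRowB suunta m (taulukko.getD m []) = true))

instance (suunta : String) (taulukko : List (List Int)) : Decidable (Pre_katso_vasen_oikea suunta taulukko) := by
  unfold Pre_katso_vasen_oikea; infer_instance

def pvWitness_katso_vasen_oikea : String × List (List Int) :=
  ("vasen", [[2, 2, 0, 4], [0, 0, 0, 0], [4, 2, 4, 2], [8, 0, 0, 2]])

def Spec_katso_vasen_oikea (suunta : String) (taulukko : List (List Int)) (out : Bool) : Prop := out = katso_vasen_oikea_alt suunta taulukko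
instance (suunta : String) (taulukko : List (List Int)) (out : Bool) : Decidable (Spec_katso_vasen_oikea suunta taulukko out) := by unfold Spec_katso_vasen_oikea; infer_instance

-- ===== CLAIM (what is proved, stated in full; the proofs are below) =====
def Claim_equal_katso_vasen_oikea : Prop := ∀ (suunta : String) (taulukko : List (List Int)), Dom_katso_vasen_oikea suunta taulukko → Pre_katso_vasen_oikea suunta taulukko → Spec_katso_vasen_oikea suunta taulukko (katso_vasen_oikea suunta taulukko)

-- ===== LEMMAS AND PROOFS =====

-- abstract form of A's inner loop: values in visiting order, previous non-zero tile, zero-seen flag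
def scanA : List Int → Option Int → Bool → Bool
  | [], _, _ => false
  | v :: vs, ed, z =>
    if v = 0 then scanA vs ed true
    else
      match ed with
      | none => z || scanA vs (some v) z
      | some e => decide (v = e) || z || scanA vs (some v) z

lemma scanA_true (vs : List Int) (ed : Option Int) :
    scanA vs ed true = vs.any (fun v => v ≠ 0) := by
  induction vs generalizing ed with
  | nil => rfl
  | cons v vs ih =>
    by_cases hv : v = 0 <;> cases ed <;> simp [scanA, hv, ih]

lemma merge2_head (t : Int) (ts : List Int) (ht : t ≠ 0) :
    ∃ h tl, merge2 (t :: ts) = h :: tl ∧ h ≠ 0 := by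
  cases ts with
  | nil => exact ⟨t, [], rfl, ht⟩
  | cons y rest =>
    by_cases hty : t = y
    · exact ⟨t * 2, merge2 rest, by simp [merge2, hty], by omega⟩
    · exact ⟨t, merge2 (y :: rest), by simp [merge2, hty], ht⟩

lemma filter_ne_nil_of_any (vs : List Int) (h : vs.any (fun v => v ≠ 0) = true) :
    ∃ t ts, vs.filter (fun x => x ≠ 0) = t :: ts ∧ t ≠ 0 := by
  have : ∃ v ∈ vs, v ≠ 0 := by simpa using h
  obtain ⟨v, hv, hv0⟩ := this
  have hmem : v ∈ vs.filter (fun x => x ≠ 0) := by simp [List.mem_filter, hv, hv0]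
  cases hf : vs.filter (fun x => x ≠ 0) with
  | nil => rw [hf] at hmem; simp at hmem
  | cons t ts =>
    refine ⟨t, ts, rfl, ?_⟩
    have : t ∈ vs.filter (fun x => x ≠ 0) := by rw [hf]; simp
    simpa using (List.of_mem_filter this)

lemma siirra_all_zero (s : List Int) (h : ∀ x ∈ s, x = 0) : siirra s = s := by
  have hf : s.filter (fun x => x ≠ 0) = [] := by
    simp [List.filter_eq_nil_iff]; intro a ha; simpa using h a ha
  have hs : s = List.replicate s.length 0 := List.eq_replicate_of_mem h
  simp only [siirra, hf, merge2, List.nil_append, List.length_nil, Nat.sub_zero]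
  exact hs.symm

-- a row that is one tile followed by zeros is already fully left-moved
lemma siirra_cons_zeros (e : Int) (zs : List Int) (hz : ∀ x ∈ zs, x = 0) :
    siirra (e :: zs) = e :: zs := by
  by_cases he : e = 0
  · refine siirra_all_zero _ ?_
    intro x hx
    rcases List.mem_cons.mp hx with h | h
    · rw [h, he]
    · exact hz x h
  · have hfz : zs.filter (fun x => x ≠ 0) = [] := by
      simp [List.filter_eq_nil_iff]; intro a ha; simpa using hz a ha
    have hf : (e :: zs).filter (fun x => x ≠ 0) = [e] := by
      rw [List.filter_cons_of_pos (by simp [he]), hfz]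
    have hrep : zs = List.replicate zs.length 0 := List.eq_replicate_of_mem hz
    simp only [siirra, hf, merge2, List.cons_append, List.nil_append, List.length_cons,
      List.length_singleton]
    norm_num
    exact hrep.symm

-- if the first merged tile differs from s's head, siirra s ≠ s
lemma siirra_ne_of_head (s : List Int) (h : Int) (tl : List Int)
    (hm : merge2 (s.filter (fun x => x ≠ 0)) = h :: tl)
    (hne : s.headI ≠ h) (hs : s ≠ []) : siirra s ≠ s := by
  intro heq
  cases s with
  | nil => exact hs rfl
  | cons a as =>
    have : siirra (a :: as) = h :: (tl ++ List.replicate ((a :: as).length - (h :: tl).length) 0) := by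
      simp only [siirra, hm]
      simp
    rw [this] at heq
    exact hne (by simpa using (List.head_eq_of_cons_eq heq).symm)

-- key step lemma: for e ≠ 0, the tail of siirra agrees (used in the w ≠ e case)
lemma siirra_cons_cons (e w : Int) (ws : List Int) (he : e ≠ 0) (hw : w ≠ 0) (hne : e ≠ w) :
    siirra (e :: w :: ws) = e :: siirra (w :: ws) := by
  have hf : (e :: w :: ws).filter (fun x => x ≠ 0) = e :: w :: ws.filter (fun x => x ≠ 0) := by
    rw [List.filter_cons_of_pos (by simp [he]), List.filter_cons_of_pos (by simp [hw])]
  have hf2 : (w :: ws).filter (fun x => x ≠ 0) = w :: ws.filter (fun x => x ≠ 0) := by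
    rw [List.filter_cons_of_pos (by simp [hw])]
  have hm : merge2 ((e :: w :: ws).filter (fun x => x ≠ 0))
      = e :: merge2 (w :: ws.filter (fun x => x ≠ 0)) := by
    rw [hf]; simp [merge2, hne]
  simp only [siirra, hm, hf2, List.length_cons, List.cons_append]
  congr 3
  omega

-- the core: A's row scan fires exactly when the move changes the row
lemma scanA_some (e : Int) (he : e ≠ 0) :
    ∀ vs : List Int, scanA vs (some e) false = true ↔ siirra (e :: vs) ≠ e :: vs := by
  intro vs
  induction vs generalizing e with
  | nil =>
    simp [scanA, siirra, List.filter, he, merge2]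
  | cons w ws ih =>
    by_cases hw : w = 0
    · subst hw
      rw [show scanA (0 :: ws) (some e) false = scanA ws (some e) true from by simp [scanA],
          scanA_true]
      constructor
      · intro hany
        obtain ⟨t, ts, hf, ht⟩ := filter_ne_nil_of_any ws hany
        have hfe : (e :: 0 :: ws).filter (fun x => x ≠ 0) = e :: t :: ts := by
          rw [List.filter_cons_of_pos (by simp [he]), List.filter_cons_of_neg (by simp), hf]
        by_cases het : e = t
        · apply siirra_ne_of_head _ (e * 2) (merge2 ts) (by rw [hfe]; simp [merge2, het])
          · simp; omega
          · simp
        · obtain ⟨h2, tl2, hm2, h20⟩ := merge2_head t ts ht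
          have hme : merge2 ((e :: 0 :: ws).filter (fun x => x ≠ 0)) = e :: h2 :: tl2 := by
            rw [hfe, show merge2 (e :: t :: ts) = e :: merge2 (t :: ts) from by
              simp [merge2, het], hm2]
          intro heq
          have hsi : siirra (e :: 0 :: ws)
              = e :: h2 :: (tl2 ++ List.replicate ((e :: 0 :: ws).length - (e :: h2 :: tl2).length) 0) := by
            simp only [siirra, hme]
            simp
          rw [hsi] at heq
          exact h20 ((List.cons_eq_cons.mp ((List.cons_eq_cons.mp heq).2)).1)
      · intro hne
        by_contra hany
        have hall : ∀ x ∈ ws, x = 0 := by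
          intro x hx; by_contra hx0
          exact hany (by simp; exact ⟨x, hx, hx0⟩)
        exact hne (siirra_cons_zeros e (0 :: ws) (by
          intro x hx
          rcases List.mem_cons.mp hx with h | h
          · exact h
          · exact hall x h))
    · by_cases hew : w = e
      · subst hew
        rw [show scanA (w :: ws) (some w) false = true from by simp [scanA, hw]]
        simp only [true_iff]
        have hfe : (w :: w :: ws).filter (fun x => x ≠ 0) = w :: w :: ws.filter (fun x => x ≠ 0) := by
          rw [List.filter_cons_of_pos (by simp [hw]), List.filter_cons_of_pos (by simp [hw])]
        apply siirra_ne_of_head _ (w * 2) (merge2 (ws.filter (fun x => x ≠ 0)))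
          (by rw [hfe]; simp [merge2])
        · simp; omega
        · simp
      · have hstep : scanA (w :: ws) (some e) false = scanA ws (some w) false := by
          simp [scanA, hw, fun h : w = e => hew h]
        rw [hstep, ih w hw, siirra_cons_cons e w ws he hw (fun h => hew h.symm)]
        constructor
        · intro h heq
          exact h (by injection heq)
        · intro h heq
          exact h (by rw [heq])

lemma scanA_none (s : List Int) : scanA s none false = true ↔ siirra s ≠ s := by
  cases s with
  | nil => simp [scanA, siirra, merge2]
  | cons v vs =>
    by_cases hv : v = 0
    · subst hv
      rw [show scanA (0 :: vs) none false = scanA vs none true from by simp [scanA], scanA_true]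
      constructor
      · intro hany
        obtain ⟨t, ts, hf, ht⟩ := filter_ne_nil_of_any vs hany
        obtain ⟨h2, tl2, hm2, h20⟩ := merge2_head t ts ht
        apply siirra_ne_of_head _ h2 tl2 (by rw [List.filter_cons_of_neg (by simp), hf, hm2])
        · simpa using fun h => h20 h.symm
        · simp
      · intro hne
        by_contra hany
        have hall : ∀ x ∈ vs, x = 0 := by
          intro x hx; by_contra hx0
          exact hany (by simp; exact ⟨x, hx, hx0⟩)
        exact hne (siirra_all_zero (0 :: vs) (by intro x hx; simp at hx; rcases hx with h | h; exact h; exact hall x h))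
    · rw [show scanA (v :: vs) none false = scanA vs (some v) false from by simp [scanA, hv]]
      exact scanA_some v hv vs

-- rowLoopA computes scanA on the visited values, reading the zero-flag from the dict at key k
lemma rowLoopA_none_iff (row : List Int) (k : Int) :
    ∀ (js : List Int) (ed : Option Int) (tot : PySem.Dict Int Bool),
      (rowLoopA row k js ed tot = none ↔
        scanA (js.map (fun j => (PySem.List.pyGet? row j).getD 0)) ed ((tot.get? k).getD false) = true) := by
  intro js
  induction js with
  | nil => intro ed tot; simp [rowLoopA, scanA]
  | cons j js ih =>
    intro ed tot
    by_cases hv : (PySem.List.pyGet? row j).getD 0 = 0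
    · have := ih ed (tot.insert k true)
      simp [rowLoopA, scanA, hv, this, PySem.Dict.get?_insert_self]
    · cases ed with
      | none =>
        by_cases hz : (tot.get? k).getD false
        · simp [rowLoopA, scanA, hv, hz]
        · simp [rowLoopA, scanA, hv, hz, ih]
      | some e =>
        by_cases hve : (PySem.List.pyGet? row j).getD 0 = e
        · have he : ¬ e = 0 := hve ▸ hv
          simp [rowLoopA, scanA, hv, hve, he]
        · by_cases hz : (tot.get? k).getD false
          · simp [rowLoopA, scanA, hv, hve, hz]
          · simp [rowLoopA, scanA, hv, hve, hz, ih]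

-- the dict after a finished row agrees with the old one at every key other than k
lemma rowLoopA_some_get? (row : List Int) (k : Int) :
    ∀ (js : List Int) (ed : Option Int) (tot tot' : PySem.Dict Int Bool),
      rowLoopA row k js ed tot = some tot' →
      ∀ k' : Int, k' ≠ k → tot'.get? k' = tot.get? k' := by
  intro js
  induction js with
  | nil => intro ed tot tot' h k' _; simp [rowLoopA] at h; rw [h]
  | cons j js ih =>
    intro ed tot tot' h k' hk'
    by_cases hv : (PySem.List.pyGet? row j).getD 0 = 0
    · simp only [rowLoopA, hv, if_pos rfl] at h
      rw [ih _ _ _ (by simpa [hv] using h) k' hk']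
      exact PySem.Dict.get?_insert_of_ne _ _ hk'
    · cases ed with
      | none =>
        by_cases hz : (tot.get? k).getD false
        · simp [rowLoopA, hv, hz] at h
        · exact ih _ _ _ (by simpa [rowLoopA, hv, hz] using h) k' hk'
      | some e =>
        by_cases hve : (PySem.List.pyGet? row j).getD 0 = e
        · have he : ¬ e = 0 := hve ▸ hv
          simp [rowLoopA, hv, hve, he] at h
        · by_cases hz : (tot.get? k).getD false
          · simp [rowLoopA, hv, hve, hz] at h
          · exact ih _ _ _ (by simpa [rowLoopA, hv, hve, hz] using h) k' hk'

-- visited values of a row of length ≥ 4, both directions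
lemma map_range_left (r : List Int) (hr : 4 ≤ r.length) :
    (PySem.List.pyRange 0 4 1).map (fun j => (PySem.List.pyGet? r j).getD 0)
      = PySem.List.slice r none (some 4) := by
  obtain ⟨a, r1⟩ : ∃ a r1, r = a :: r1 := by cases r with | nil => simp at hr | cons a r1 => exact ⟨a, r1, rfl⟩
  obtain ⟨r1, rfl⟩ := r1
  obtain ⟨b, r2⟩ : ∃ b r2, r1 = b :: r2 := by cases r1 with | nil => simp at hr | cons b r2 => exact ⟨b, r2, rfl⟩
  obtain ⟨r2, rfl⟩ := r2
  obtain ⟨c, r3⟩ : ∃ c r3, r2 = c :: r3 := by cases r2 with | nil => simp at hr | cons c r3 => exact ⟨c, r3, rfl⟩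
  obtain ⟨r3, rfl⟩ := r3
  obtain ⟨d, r4⟩ : ∃ d r4, r3 = d :: r4 := by cases r3 with | nil => simp at hr | cons d r4 => exact ⟨d, r4, rfl⟩
  obtain ⟨r4, rfl⟩ := r4
  have hrange : PySem.List.pyRange 0 4 1 = [0, 1, 2, 3] := by decide
  have hslice : PySem.List.slice (a :: b :: c :: d :: r4) none (some 4) = [a, b, c, d] := by
    rw [show ((4:Int)) = ((4:Nat):Int) from by norm_num, PySem.List.slice_to_natCast]
    rfl
  rw [hrange, hslice]
  simp [PySem.List.pyGet?_of_nonneg]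

lemma map_range_right (r : List Int) (hr : 4 ≤ r.length) :
    (PySem.List.pyRange 3 (-1) (-1)).map (fun j => (PySem.List.pyGet? r j).getD 0)
      = (PySem.List.slice r none (some 4)).reverse := by
  obtain ⟨a, r1⟩ : ∃ a r1, r = a :: r1 := by cases r with | nil => simp at hr | cons a r1 => exact ⟨a, r1, rfl⟩
  obtain ⟨r1, rfl⟩ := r1
  obtain ⟨b, r2⟩ : ∃ b r2, r1 = b :: r2 := by cases r1 with | nil => simp at hr | cons b r2 => exact ⟨b, r2, rfl⟩
  obtain ⟨r2, rfl⟩ := r2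
  obtain ⟨c, r3⟩ : ∃ c r3, r2 = c :: r3 := by cases r2 with | nil => simp at hr | cons c r3 => exact ⟨c, r3, rfl⟩
  obtain ⟨r3, rfl⟩ := r3
  obtain ⟨d, r4⟩ : ∃ d r4, r3 = d :: r4 := by cases r3 with | nil => simp at hr | cons d r4 => exact ⟨d, r4, rfl⟩
  obtain ⟨r4, rfl⟩ := r4
  have hrange : PySem.List.pyRange 3 (-1) (-1) = [3, 2, 1, 0] := by decide
  have hslice : PySem.List.slice (a :: b :: c :: d :: r4) none (some 4) = [a, b, c, d] := by
    rw [show ((4:Int)) = ((4:Nat):Int) from by norm_num, PySem.List.slice_to_natCast]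
    rfl
  rw [hrange, hslice]
  simp [PySem.List.pyGet?_of_nonneg]

-- a non-zero entry somewhere makes List.any (· ≠ 0) fire
lemma any_ne_zero_of_getD (vs : List Int) (n : Nat) (hn : n < vs.length)
    (h : vs.getD n 0 ≠ 0) : (vs.any fun v => v ≠ 0) = true := by
  rw [List.getD_eq_getElem vs 0 hn] at h
  simp only [List.any_eq_true]
  exact ⟨vs[n], List.getElem_mem hn, by simpa using h⟩

-- a scan that fires with no pending tile also fires with one
lemma scanA_mono (e : Int) : ∀ (vs : List Int) (z : Bool),
    scanA vs none z = true → scanA vs (some e) z = true := by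
  intro vs
  induction vs with
  | nil => intro z h; simpa [scanA] using h
  | cons v vs ih =>
    intro z h
    by_cases hv : v = 0
    · simp only [scanA, if_pos hv] at h ⊢
      exact ih true h
    · simp only [scanA, if_neg hv, Bool.or_eq_true] at h ⊢
      rcases h with h | h
      · exact Or.inl (Or.inr h)
      · exact Or.inr h

-- Pre_'s first-row clause (a 0 before a non-zero, or an equal pair with only 0s between)
-- makes the scan fire
lemma trig_scan : ∀ s : List Int, trigP s → scanA s none false = true := by
  intro s
  induction s with
  | nil => rintro ⟨j, hj, -⟩; simp at hj
  | cons v vs ih =>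
    rintro ⟨j, hj, i, hij, hD⟩

    obtain ⟨j', rfl⟩ : ∃ j', j = j' + 1 := ⟨j - 1, by omega⟩
    have hj' : j' < vs.length := by simpa using hj
    by_cases hv : v = 0
    · rw [show scanA (v :: vs) none false = scanA vs none true from by simp [scanA, hv],
          scanA_true]
      rcases hD with ⟨-, hnz⟩ | ⟨hnz, -, -⟩
      · rw [List.getD_cons_succ] at hnz
        exact any_ne_zero_of_getD vs j' hj' hnz
      · rcases Nat.eq_zero_or_pos i with hi | hi
        · subst hi; rw [List.getD_cons_zero] at hnz; exact absurd hv hnz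
        · obtain ⟨i', rfl⟩ : ∃ i', i = i' + 1 := ⟨i - 1, by omega⟩
          rw [List.getD_cons_succ] at hnz
          exact any_ne_zero_of_getD vs i' (by omega) hnz
    · rw [show scanA (v :: vs) none false = scanA vs (some v) false from by simp [scanA, hv]]
      rcases Nat.eq_zero_or_pos i with hi0 | hi0
      · subst hi0
        rcases hD with ⟨hz, -⟩ | ⟨-, heq, hbet⟩
        · rw [List.getD_cons_zero] at hz; exact absurd hz hv
        · rw [List.getD_cons_succ, List.getD_cons_zero] at heq
          rcases Nat.eq_zero_or_pos j' with hj0 | hj0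
          · subst hj0
            cases vs with
            | nil => simp at hj'
            | cons w ws =>
              have hw : w = v := by simpa using heq
              simp [scanA, hw, hv]
          · have h1 : vs.getD 0 0 = 0 := by
              have := hbet 1 (by omega) (by omega)
              simpa [List.getD_cons_succ] using this
            cases vs with
            | nil => simp at hj'
            | cons w ws =>
              have hw : w = 0 := by simpa using h1
              subst hw
              rw [show scanA (0 :: ws) (some v) false = scanA ws (some v) true from by
                    simp [scanA], scanA_true]
              obtain ⟨j'', rfl⟩ : ∃ t, j' = t + 1 := ⟨j' - 1, by omega⟩
              rw [List.getD_cons_succ] at heq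
              exact any_ne_zero_of_getD ws j'' (by simpa using hj') (by rw [heq]; exact hv)
      · obtain ⟨i', rfl⟩ : ∃ i', i = i' + 1 := ⟨i - 1, by omega⟩
        apply scanA_mono
        apply ih
        refine ⟨j', hj', i', by omega, ?_⟩

        rcases hD with ⟨hz, hnz⟩ | ⟨hnz, heq, hbet⟩
        · rw [List.getD_cons_succ] at hz hnz
          exact Or.inl ⟨hz, hnz⟩
        · rw [List.getD_cons_succ] at hnz heq
          refine Or.inr ⟨hnz, by simpa [List.getD_cons_succ] using heq, ?_⟩
          intro k hk1 hk2
          have := hbet (k + 1) (by omega) (by omega)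
          simpa [List.getD_cons_succ] using this

-- the visited values of ANY row, left direction: the 4-tile prefix padded with 0s
lemma map_range_left_pad (r : List Int) :
    (PySem.List.pyRange 0 4 1).map (fun j => (PySem.List.pyGet? r j).getD 0)
      = r.take 4 ++ List.replicate (4 - (r.take 4).length) 0 := by
  match r with
  | [] => rfl
  | [a] => rfl
  | [a, b] => rfl
  | [a, b, c] => rfl
  | a :: b :: c :: d :: t =>
    rw [map_range_left (a :: b :: c :: d :: t) (by simp),
        show ((4:Int)) = ((4:Nat):Int) from by norm_num, PySem.List.slice_to_natCast]
    rfl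

-- appended zeros never create a move: the scan ignores them
lemma scanA_zeros (n : Nat) (ed : Option Int) : ∀ z : Bool,
    scanA (List.replicate n 0) ed z = false := by
  induction n with
  | zero => intro z; rfl
  | succ n ihn =>
    intro z
    simp only [List.replicate_succ, scanA, if_pos rfl]
    exact ihn true

lemma scanA_pad : ∀ (st : List Int) (n : Nat) (ed : Option Int) (z : Bool),
    scanA (st ++ List.replicate n 0) ed z = scanA st ed z := by
  intro st
  induction st with
  | nil =>
    intro n ed z
    rw [List.nil_append, scanA_zeros]
    rfl
  | cons v vs ih =>
    intro n ed z
    by_cases hv : v = 0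
    · simp only [List.cons_append, scanA, if_pos hv]; exact ih n ed true
    · cases ed <;> simp only [List.cons_append, scanA, if_neg hv] <;> rw [ih]

-- rivi[:4] is the 4-tile prefix
lemma slice4 (r : List Int) : PySem.List.slice r none (some 4) = r.take 4 := by
  rw [show ((4:Int)) = ((4:Nat):Int) from by norm_num, PySem.List.slice_to_natCast]

lemma passB_iff (suunta : String) (m : Nat) (r : List Int) :
    passB suunta m r = true ↔ passP suunta m r := by
  simp [passB]
lemma trigRowB_iff (suunta : String) (m : Nat) (r : List Int) :
    trigRowB suunta m r = true ↔ trigRowP suunta m r := by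
  simp [trigRowB]

-- for 'oikea' every row up to (and including) the first moving row is ≥ 4 tiles long
def okO : List (List Int) → Prop
  | [] => True
  | r :: rest => 4 ≤ r.length ∧ (trigP (viewP "oikea" r) ∨ okO rest)

-- Pre_'s row-by-row condition gives okO
lemma prefix_okO : ∀ (rows : List (List Int)) (m0 : Nat),
    (∀ m < rows.length,
      (∀ m' < m, passP "oikea" (m0 + m') (rows.getD m' [])) →
      (passP "oikea" (m0 + m) (rows.getD m []) ∨ trigRowP "oikea" (m0 + m) (rows.getD m []))) →
    okO rows := by
  intro rows
  induction rows with
  | nil => intro m0 _; trivial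
  | cons r rest ih =>
    intro m0 H
    have h0 := H 0 (by simp) (by intro m' hm'; omega)
    simp only [List.getD_cons_zero, Nat.add_zero] at h0
    rcases h0 with hp | ht
    · refine ⟨hp.1, Or.inr (ih (m0 + 1) ?_)⟩
      intro m hm hpref
      have hH := H (m + 1) (by simpa using Nat.succ_lt_succ hm) ?_
      · have harith : m0 + (m + 1) = m0 + 1 + m := by omega
        rw [harith, List.getD_cons_succ] at hH
        exact hH
      · intro m' hm'
        cases m' with
        | zero => simpa using hp
        | succ k =>
          rw [List.getD_cons_succ, show m0 + (k + 1) = m0 + 1 + k from by omega]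
          exact hpref k (by omega)
    · exact ⟨ht.2.1 rfl, Or.inl ht.1⟩

-- A's outer loop, left direction: equals B's any on EVERY grid
lemma outLoop_vasen : ∀ (rows : List (List Int)) (tot : PySem.Dict Int Bool) (k : Int),
    (∀ i : Nat, (tot.get? (k + i)).getD false = false) →
    outLoopA 0 4 1 rows tot k
      = rows.any (fun rivi =>
          siirra (PySem.List.slice rivi none (some 4)) ≠ PySem.List.slice rivi none (some 4)) := by
  intro rows
  induction rows with
  | nil => intro tot k _; simp [outLoopA]
  | cons rivi rest ih =>
    intro tot k hinv
    have hk : (tot.get? k).getD false = false := by simpa using hinv 0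
    have hiff := rowLoopA_none_iff rivi k (PySem.List.pyRange 0 4 1) none tot
    rw [map_range_left_pad, hk, scanA_pad, ← slice4] at hiff
    set s := PySem.List.slice rivi none (some 4) with hs
    by_cases hchanged : siirra s ≠ s
    · have : rowLoopA rivi k (PySem.List.pyRange 0 4 1) none tot = none := by
        rw [hiff]; exact (scanA_none s).2 hchanged
      simp [outLoopA, this, List.any_cons]
      left; exact hchanged
    · have hnotnone : rowLoopA rivi k (PySem.List.pyRange 0 4 1) none tot ≠ none := by
        intro h
        exact hchanged ((scanA_none s).1 (hiff.mp h))
      obtain ⟨tot', htot'⟩ : ∃ t, rowLoopA rivi k (PySem.List.pyRange 0 4 1) none tot = some t := by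
        cases h : rowLoopA rivi k (PySem.List.pyRange 0 4 1) none tot with
        | none => exact absurd h hnotnone
        | some t => exact ⟨t, rfl⟩
      have hinv' : ∀ i : Nat, (tot'.get? (k + 1 + i)).getD false = false := by
        intro i
        rw [rowLoopA_some_get? rivi k _ _ _ _ htot' (k + 1 + i) (by omega)]
        have := hinv (i + 1)
        convert this using 3
        push_cast; ring
      rw [show outLoopA 0 4 1 (rivi :: rest) tot k = outLoopA 0 4 1 rest tot' (k + 1) from by
            simp [outLoopA, htot']]
      rw [ih tot' (k + 1) hinv']
      simp [List.any_cons]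
      intro h
      exact absurd h hchanged

-- A's outer loop, right direction: equals B's any on okO grids
lemma outLoop_oikea : ∀ (rows : List (List Int)) (tot : PySem.Dict Int Bool) (k : Int),
    (∀ i : Nat, (tot.get? (k + i)).getD false = false) → okO rows →
    outLoopA 3 (-1) (-1) rows tot k
      = rows.any (fun rivi =>
          siirra (PySem.List.slice rivi none (some 4)).reverse
            ≠ (PySem.List.slice rivi none (some 4)).reverse) := by
  intro rows
  induction rows with
  | nil => intro tot k _ _; simp [outLoopA]
  | cons rivi rest ih =>
    intro tot k hinv hok
    obtain ⟨hlen4, hok'⟩ := hok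
    have hk : (tot.get? k).getD false = false := by simpa using hinv 0
    have hiff := rowLoopA_none_iff rivi k (PySem.List.pyRange 3 (-1) (-1)) none tot
    rw [map_range_right rivi hlen4, hk] at hiff
    set s := (PySem.List.slice rivi none (some 4)).reverse with hs
    by_cases hchanged : siirra s ≠ s
    · have : rowLoopA rivi k (PySem.List.pyRange 3 (-1) (-1)) none tot = none := by
        rw [hiff]; exact (scanA_none s).2 hchanged
      simp [outLoopA, this, List.any_cons]
      left; exact hchanged
    · have hrest : okO rest := by
        rcases hok' with ht | h
        · exfalso
          apply hchanged
          apply (scanA_none s).1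
          have := trig_scan _ ht
          rw [show viewP "oikea" rivi = s from by rw [hs, slice4]; rfl] at this
          exact this
        · exact h
      have hnotnone : rowLoopA rivi k (PySem.List.pyRange 3 (-1) (-1)) none tot ≠ none := by
        intro h
        exact hchanged ((scanA_none s).1 (hiff.mp h))
      obtain ⟨tot', htot'⟩ : ∃ t, rowLoopA rivi k (PySem.List.pyRange 3 (-1) (-1)) none tot = some t := by
        cases h : rowLoopA rivi k (PySem.List.pyRange 3 (-1) (-1)) none tot with
        | none => exact absurd h hnotnone
        | some t => exact ⟨t, rfl⟩
      have hinv' : ∀ i : Nat, (tot'.get? (k + 1 + i)).getD false = false := by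
        intro i
        rw [rowLoopA_some_get? rivi k _ _ _ _ htot' (k + 1 + i) (by omega)]
        have := hinv (i + 1)
        convert this using 3
        push_cast; ring
      rw [show outLoopA 3 (-1) (-1) (rivi :: rest) tot k = outLoopA 3 (-1) (-1) rest tot' (k + 1) from by
            simp [outLoopA, htot']]
      rw [ih tot' (k + 1) hinv' hrest]
      simp [List.any_cons]
      intro h
      exact absurd h hchanged

-- ===== VERDICT (by name: the statement is the Claim_ definition above) =====
theorem katso_vasen_oikea_spec : Claim_equal_katso_vasen_oikea := by
  intro suunta taulukko _ hpre
  unfold Spec_katso_vasen_oikea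
  rcases hpre with rfl | ⟨hdir, hrows⟩
  · cases hs : decide (suunta = "vasen") <;>
      simp [katso_vasen_oikea, katso_vasen_oikea_alt, outLoopA]
  · have hinv : ∀ i : Nat,
        ((((((PySem.Dict.empty).insert 1 false).insert 2 false).insert 3 false).insert (4:Int) false).get? (1 + (i:Int))).getD false = false := by
      intro i
      by_cases hi4 : i < 4
      · interval_cases i <;> decide
      · rw [PySem.Dict.get?_insert_of_ne _ _ (by omega), PySem.Dict.get?_insert_of_ne _ _ (by omega),
            PySem.Dict.get?_insert_of_ne _ _ (by omega), PySem.Dict.get?_insert_of_ne _ _ (by omega)]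
        rfl
    rcases hdir with rfl | rfl
    · have hmain := outLoop_vasen taulukko
        (((((PySem.Dict.empty).insert 1 false).insert 2 false).insert 3 false).insert (4:Int) false)
        1 (by simpa using hinv)
      simpa [katso_vasen_oikea, katso_vasen_oikea_alt] using hmain
    · have hok : okO taulukko := by
        apply prefix_okO taulukko 0
        intro m hm hpref
        have := hrows m hm (fun m' hm' => (passB_iff _ _ _).mpr (by simpa using hpref m' hm'))
        simpa [passB_iff, trigRowB_iff] using this
      have hmain := outLoop_oikea taulukko
        (((((PySem.Dict.empty).insert 1 false).insert 2 false).insert 3 false).insert (4:Int) false)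
        1 (by simpa using hinv) hok
      simpa [katso_vasen_oikea, katso_vasen_oikea_alt] using hmain
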